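-- pv_equiv track=rewrite | github.com/GoldiGold/SecureProject | project.py | is_only_one_byte_diff
-- ===== SOURCE A (Python) =====
-- def is_only_one_byte_diff(block):
--     """
--     The function receives a block and checks if there is a single byte that is different from the others.
--     :param block: a block of bytes.
--     :return: boolean answer, the different byte's index (or None if is answer is False)
--     """
--     n = len(block) - 1
--     counts = dict()
--     # iterating over each byte in the block and counting the appearances of them.
--     for b in block:
--         if b not in counts:
--             counts[b] = 0
--         counts[b] += 1
--
--     for b in counts:
--         # check if a byte repeats itself n times (n = len(block) - 1):
--         # if so, there must be only one different ("wrong") byte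
--         if counts[b] == n:
--             # if a "wrong" byte exists we will find it and return its index
--             for i in range(n + 1):
--                 if block[i] != b:
--                     return True, i
--     return False, None
-- ===== SOURCE B (Python) =====
-- def is_only_one_byte_diff(block):
--     if len(block) < 2:
--         return False, None
--     first = block[0]
--     diff = [i for i in range(len(block)) if block[i] != first]
--     if len(diff) == 1:
--         return True, diff[0]
--     if len(diff) == len(block) - 1 and all(b == block[1] for b in block[1:]):
--         return True, 0
--     return False, None
-- ===== Notes on version B (the rewrite author's own statement) =====
-- stated objective: faster
-- what changed: Replaces the frequency dictionary plus a rescan of the block per candidate byte with a single pass that collects the indices whose byte differs from the first byte and classifies the block by the shape of that index list.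
import Mathlib
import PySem

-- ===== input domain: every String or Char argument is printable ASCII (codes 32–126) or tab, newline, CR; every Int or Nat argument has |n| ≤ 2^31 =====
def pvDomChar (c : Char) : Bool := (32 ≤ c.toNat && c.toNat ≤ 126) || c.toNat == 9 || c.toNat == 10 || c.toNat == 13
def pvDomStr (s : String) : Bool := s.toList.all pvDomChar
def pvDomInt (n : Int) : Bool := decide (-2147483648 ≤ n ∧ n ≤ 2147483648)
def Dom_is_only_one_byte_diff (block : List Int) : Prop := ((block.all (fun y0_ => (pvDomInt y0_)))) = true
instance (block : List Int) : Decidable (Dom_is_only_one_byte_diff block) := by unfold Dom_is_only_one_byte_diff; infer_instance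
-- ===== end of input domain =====

-- B replaces A's frequency dictionary + per-key rescan with a single pass collecting the indices
-- whose byte differs from the first byte, classifying the block by that index list's shape (faster, measured).

-- ===== PORT A =====
-- counting loop: 'if b not in counts: counts[b] = 0; counts[b] += 1'
def pvCountLoop (block : List Int) : PySem.Dict Int Int :=
  block.foldl (fun d b =>
    (if d.contains b then d else d.insert b 0).modify b 0 (· + 1)) PySem.Dict.empty

-- inner loop 'for i in range(n + 1): if block[i] != b: return True, i' (none = fell through / IndexError, unreachable here)
def pvFindIdx (block : List Int) (b : Int) : List Int → Option Int
  | [] => none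
  | i :: is =>
    match PySem.List.pyGet? block i with
    | some v => if v ≠ b then some i else pvFindIdx block b is
    | none => none

-- outer loop 'for b in counts: if counts[b] == n: …'
def pvScan (block : List Int) (counts : PySem.Dict Int Int) (n : Int) : List Int → Bool × Option Int
  | [] => (false, none)
  | b :: ks =>
    if counts.getD b 0 = n then
      match pvFindIdx block b (PySem.List.pyRange 0 (n + 1) 1) with
      | some i => (true, some i)
      | none => pvScan block counts n ks
    else pvScan block counts n ks

def is_only_one_byte_diff (block : List Int) : Bool × Option Int :=
  let n : Int := (block.length : Int) - 1
  let counts := pvCountLoop block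
  pvScan block counts n counts.keys

-- ===== PORT B =====
def is_only_one_byte_diff_alt (block : List Int) : Bool × Option Int :=
  if block.length < 2 then (false, none)
  else
    -- block[0] and block[i] for i in range(len(block)) are always in range, so pyGetD is exact
    let first := PySem.List.pyGetD block 0 0
    let diff := (PySem.List.pyRange 0 (block.length : Int) 1).filter
      (fun i => decide (PySem.List.pyGetD block i 0 ≠ first))
    if diff.length = 1 then (true, PySem.List.pyGet? diff 0)
    else if diff.length = block.length - 1
        && (PySem.List.slice block (some 1) none).all (fun b => b == PySem.List.pyGetD block 1 0) then
      (true, some 0)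
    else (false, none)

-- ===== PRECONDITION & SPEC =====
def Spec_is_only_one_byte_diff (block : List Int) (out : Bool × Option Int) : Prop := out = is_only_one_byte_diff_alt block
instance (block : List Int) (out : Bool × Option Int) : Decidable (Spec_is_only_one_byte_diff block out) := by unfold Spec_is_only_one_byte_diff; infer_instance

-- ===== CLAIM (what is proved, stated in full; the proofs are below) =====
def Claim_equal_is_only_one_byte_diff : Prop := ∀ (block : List Int), Dom_is_only_one_byte_diff block → Spec_is_only_one_byte_diff block (is_only_one_byte_diff block)

-- ===== LEMMAS AND PROOFS =====

-- pvG p l = the list of indices of l whose element satisfies p (a recursion both ports' index scans reduce to)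
def pvG (p : Int → Bool) : List Int → List Nat
  | [] => []
  | x :: xs => if p x then 0 :: (pvG p xs).map (· + 1) else (pvG p xs).map (· + 1)

theorem pvG_length (p : Int → Bool) (l : List Int) : (pvG p l).length = l.countP p := by
  induction l with
  | nil => rfl
  | cons x xs ih => by_cases h : p x <;> simp [pvG, h, ih]

theorem pvG_filter_range (p : Int → Bool) (l : List Int) :
    (List.range l.length).filter (fun i => p (l.getD i 0)) = pvG p l := by
  induction l with
  | nil => rfl
  | cons x xs ih =>
    simp only [List.length_cons, List.range_succ_eq_map, List.filter_cons, List.filter_map]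
    by_cases h : p x <;> simp [pvG, h, ← ih] <;> rfl

theorem pvG_nil_of_all_not (p : Int → Bool) (l : List Int) (h : ∀ x ∈ l, p x = false) :
    pvG p l = [] := by
  induction l with
  | nil => rfl
  | cons x xs ih => simp [pvG, h x (by simp), ih (fun y hy => h y (by simp [hy]))]

theorem pvG_range_of_all (p : Int → Bool) (l : List Int) (h : ∀ x ∈ l, p x = true) :
    pvG p l = List.range l.length := by
  induction l with
  | nil => rfl
  | cons x xs ih =>
    simp [pvG, h x (by simp), ih (fun y hy => h y (by simp [hy])), List.range_succ_eq_map]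

theorem countP_add_count (l : List Int) (b : Int) :
    l.countP (fun v => decide (v ≠ b)) + l.count b = l.length := by
  induction l with
  | nil => rfl
  | cons x xs ih =>
    rw [List.countP_cons, List.count_cons, List.length_cons]
    by_cases h : x = b
    · rw [if_neg (by simp [h]), if_pos (by simp [h])]; omega
    · rw [if_pos (by simp [h]), if_neg (by simp [h])]; omega

theorem count_add_count_le (l : List Int) (b k : Int) (h : k ≠ b) :
    l.count k + l.count b ≤ l.length := by
  have h1 : l.count k ≤ l.countP (fun v => decide (v ≠ b)) := by
    rw [List.count_eq_countP]
    exact List.countP_mono_left (by intro a _ ha; simp at ha; simp [ha, h])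
  have := countP_add_count l b
  omega

-- B's diff list is pvG of the "differs from first" test
theorem diff_eq (block : List Int) (c : Int) :
    (PySem.List.pyRange 0 (block.length : Int) 1).filter
      (fun i => decide (PySem.List.pyGetD block i 0 ≠ c)) =
    (pvG (fun v => decide (v ≠ c)) block).map (fun n : Nat => (n : Int)) := by
  rw [PySem.List.pyRange_one, List.filter_map]
  simp only [Int.sub_zero, Int.toNat_natCast, zero_add, Function.comp_def,
    PySem.List.pyGetD_natCast]
  rw [← pvG_filter_range]

-- A's inner loop returns the first index of pvG
theorem pvFindIdx_aux (block : List Int) (b : Int) (is : List Nat) (h : ∀ i ∈ is, i < block.length) :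
    pvFindIdx block b (is.map (fun n : Nat => (n : Int))) =
      ((is.filter (fun i => decide (block.getD i 0 ≠ b))).head?).map (fun n : Nat => (n : Int)) := by
  induction is with
  | nil => rfl
  | cons i is ih =>
    have hi : i < block.length := h i (by simp)
    have hget : PySem.List.pyGet? block ((i : Nat) : Int) = some (block.getD i 0) := by
      rw [PySem.List.pyGet?_natCast, List.getElem?_eq_getElem hi, List.getD_eq_getElem _ _ hi]
    rw [List.map_cons, List.filter_cons]
    show (match PySem.List.pyGet? block ((i : Nat) : Int) with
      | some v => if v ≠ b then some ((i : Nat) : Int)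
          else pvFindIdx block b (is.map (fun n : Nat => (n : Int)))
      | none => none) = _
    rw [hget]
    show (if block.getD i 0 ≠ b then some ((i : Nat) : Int)
        else pvFindIdx block b (is.map (fun n : Nat => (n : Int)))) = _
    by_cases hb : block.getD i 0 = b
    · rw [if_neg (by simp [- List.getD_eq_getElem?_getD, hb])]
      simp only [hb, ne_eq, not_true_eq_false]
      exact ih (fun j hj => h j (by simp [hj]))
    · rw [if_pos hb, if_pos (by simp [- List.getD_eq_getElem?_getD, hb])]
      simp

theorem pvFindIdx_eq (block : List Int) (b : Int) :
    pvFindIdx block b (PySem.List.pyRange 0 (block.length : Int) 1) =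
      ((pvG (fun v => decide (v ≠ b)) block).head?).map (fun n : Nat => (n : Int)) := by
  rw [PySem.List.pyRange_one]
  simp only [Int.sub_zero, Int.toNat_natCast, zero_add]
  rw [pvFindIdx_aux block b _ (fun i hi => List.mem_range.mp hi), ← pvG_filter_range]

-- A's counting loop is collections.Counter
theorem pvCountStep (d : PySem.Dict Int Int) (b : Int) :
    (if d.contains b then d else d.insert b 0).modify b 0 (· + 1) = d.modify b 0 (· + 1) := by
  cases h : d.contains b with
  | true => simp
  | false =>
    rw [if_neg (by simp)]
    simp only [PySem.Dict.modify, PySem.Dict.getD_insert_self, PySem.Dict.insert_insert_self,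
      PySem.Dict.getD_of_not_contains (d := d) (d0 := 0) h]

theorem pvCountLoop_eq (block : List Int) : pvCountLoop block = PySem.Dict.counter block := by
  unfold pvCountLoop
  rw [PySem.Dict.counter_eq_foldl]
  apply PySem.List.foldl_congr_mem
  intro d x _
  exact pvCountStep d x

-- scan lemmas
theorem pvScan_none (block : List Int) (counts : PySem.Dict Int Int) (n : Int) (ks : List Int)
    (h : ∀ k ∈ ks, counts.getD k 0 ≠ n) : pvScan block counts n ks = (false, none) := by
  induction ks with
  | nil => rfl
  | cons k ks ih => simp [pvScan, h k (by simp), ih (fun j hj => h j (by simp [hj]))]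

theorem pvScan_unique (block : List Int) (counts : PySem.Dict Int Int) (n : Int) (b i0 : Int)
    (ks : List Int) (hb : b ∈ ks) (hcnt : counts.getD b 0 = n)
    (huniq : ∀ k ∈ ks, k ≠ b → counts.getD k 0 ≠ n)
    (hfind : pvFindIdx block b (PySem.List.pyRange 0 (n + 1) 1) = some i0) :
    pvScan block counts n ks = (true, some i0) := by
  induction ks with
  | nil => cases hb
  | cons k ks ih =>
    by_cases hk : k = b
    · subst hk; simp [pvScan, hcnt, hfind]
    · have hne : counts.getD k 0 ≠ n := huniq k (by simp) hk
      simp only [pvScan, hne, if_false]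
      exact ih ((List.mem_cons.mp hb).resolve_left (fun h => hk h.symm))
        (fun j hj hjb => huniq j (by simp [hj]) hjb)


-- A in scan normal form
theorem A_eq (block : List Int) :
    is_only_one_byte_diff block =
      pvScan block (PySem.Dict.counter block) ((block.length : Int) - 1)
        (PySem.Dict.counter block).keys := by
  unfold is_only_one_byte_diff
  rw [pvCountLoop_eq]

theorem mem_keys_counter (block : List Int) (k : Int) :
    k ∈ (PySem.Dict.counter block).keys ↔ k ∈ block := by
  simp [PySem.Dict.keys_counter, PySem.Set.mem_ofList]

-- B in pvG normal form for blocks of length ≥ 2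
theorem B_eq (a c : Int) (zs : List Int) :
    is_only_one_byte_diff_alt (a :: c :: zs) =
      (if ((pvG (fun v => decide (v ≠ a)) (a :: c :: zs)).map (fun n : Nat => (n : Int))).length = 1
        then (true, PySem.List.pyGet? ((pvG (fun v => decide (v ≠ a)) (a :: c :: zs)).map (fun n : Nat => (n : Int))) 0)
       else if ((pvG (fun v => decide (v ≠ a)) (a :: c :: zs)).map (fun n : Nat => (n : Int))).length = zs.length + 1
            && (c :: zs).all (fun y => y == c) then (true, some 0)
       else (false, none)) := by
  unfold is_only_one_byte_diff_alt
  rw [if_neg (by simp)]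
  simp only [PySem.List.pyGetD_zero_cons]
  rw [diff_eq (a :: c :: zs) a]
  have h1 : PySem.List.pyGetD (a :: c :: zs) 1 0 = c := by
    rw [show (1 : Int) = ((1 : Nat) : Int) by norm_num, PySem.List.pyGetD_natCast]; rfl
  simp only [PySem.List.slice_from_one, List.tail_cons, h1, List.length_cons,
    Nat.add_sub_cancel]

theorem scan_fire (l : List Int) (b : Int) (i0 : Nat)
    (hbmem : b ∈ l) (hbcnt : l.count b = l.length - 1) (hL : 3 ≤ l.length)
    (hG : pvG (fun v => decide (v ≠ b)) l = [i0]) :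
    is_only_one_byte_diff l = (true, some (i0 : Int)) := by
  rw [A_eq]
  apply pvScan_unique l _ _ b
  · exact (mem_keys_counter _ _).mpr hbmem
  · rw [PySem.Dict.getD_counter, hbcnt]; omega
  · intro k _ hkb
    rw [PySem.Dict.getD_counter]
    have := count_add_count_le l b k hkb
    omega
  · have : ((l.length : Int) - 1) + 1 = ((l.length : Nat) : Int) := by ring
    rw [this, pvFindIdx_eq, hG]
    rfl

theorem main_three (a c d : Int) (zs : List Int) :
    is_only_one_byte_diff (a :: c :: d :: zs) = is_only_one_byte_diff_alt (a :: c :: d :: zs) := by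
  have hLlen : (a :: c :: d :: zs).length = zs.length + 3 := by simp
  by_cases hex : ∃ v ∈ (a :: c :: d :: zs), (a :: c :: d :: zs).count v = (a :: c :: d :: zs).length - 1
  · obtain ⟨b, hbmem, hbcnt⟩ := hex
    have hcp : (a :: c :: d :: zs).countP (fun v => decide (v ≠ b)) = 1 := by
      have := countP_add_count (a :: c :: d :: zs) b
      omega
    by_cases hab : a = b
    · subst hab
      have hlen1 : (pvG (fun v => decide (v ≠ a)) (a :: c :: d :: zs)).length = 1 := by
        rw [pvG_length]; exact hcp
      obtain ⟨i0, hi0⟩ := List.length_eq_one_iff.mp hlen1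
      rw [scan_fire _ a i0 hbmem hbcnt (by omega) hi0, B_eq, if_pos (by rw [hi0]; rfl), hi0]
      rfl
    · have hxs : (c :: d :: zs).count b = (c :: d :: zs).length := by
        have h1 : (a :: c :: d :: zs).count b = (c :: d :: zs).count b + if a == b then 1 else 0 := by
          rw [List.count_cons]
        simp only [beq_iff_eq, hab, if_false] at h1
        have h2 := List.count_le_length (l := c :: d :: zs) (a := b)
        simp only [List.length_cons] at *
        omega
      have hall : ∀ y ∈ (c :: d :: zs), b = y := List.count_eq_length.mp hxs
      have hc : c = b := (hall c (by simp)).symm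
      have hG : pvG (fun v => decide (v ≠ b)) (a :: c :: d :: zs) = [0] := by
        show (if decide (a ≠ b) = true then _ else _) = _
        rw [if_pos (by simp [hab]),
          pvG_nil_of_all_not _ _ (fun y hy => by
            simp only [ne_eq, decide_eq_false_iff_not, not_not]
            exact (hall y hy).symm)]
        rfl
      have hGa : pvG (fun v => decide (v ≠ a)) (a :: c :: d :: zs)
          = (List.range (zs.length + 2)).map (· + 1) := by
        show (if decide (a ≠ a) = true then _ else _) = _
        rw [if_neg (by simp),
          pvG_range_of_all _ _ (fun y hy => by
            simp only [ne_eq, decide_eq_true_eq]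
            exact fun h => hab ((h ▸ hall y hy).symm))]
        simp
      rw [scan_fire _ b 0 hbmem hbcnt (by omega) hG, B_eq, hGa]
      rw [if_neg (by simp), if_pos (by
        refine Bool.and_eq_true_iff.mpr ⟨by simp, List.all_eq_true.mpr ?_⟩
        intro y hy
        have hyb : y = b := (hall y hy).symm
        simp [hyb, hc])]
      norm_num
  · push Not at hex
    rw [A_eq, pvScan_none _ _ _ _ (by
      intro k hk
      rw [PySem.Dict.getD_counter]
      have hkm : k ∈ (a :: c :: d :: zs) := (mem_keys_counter _ _).mp hk
      have := hex k hkm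
      omega), B_eq]
    have hcpa := countP_add_count (a :: c :: d :: zs) a
    split_ifs with h1 h2
    · exfalso
      rw [List.length_map, pvG_length] at h1
      have hca : (a :: c :: d :: zs).count a = (a :: c :: d :: zs).length - 1 := by
        simp only [List.length_cons] at *
        omega
      exact hex a (by simp) hca
    · exfalso
      obtain ⟨h2len, h2all⟩ := Bool.and_eq_true_iff.mp h2
      rw [decide_eq_true_eq, List.length_map, pvG_length] at h2len
      have hca : (a :: c :: d :: zs).count a = 1 := by
        simp only [List.length_cons] at *
        omega
      have hally : ∀ y ∈ (c :: d :: zs), y = c := by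
        have hsimp := List.all_eq_true.mp h2all
        intro y hy
        simpa using hsimp y hy
      have hcxs : (c :: d :: zs).count c = (c :: d :: zs).length := by
        rw [List.count_eq_length]
        exact fun y hy => (hally y hy).symm
      have hsplit : (a :: c :: d :: zs).count c
          = (c :: d :: zs).count c + if a == c then 1 else 0 := by rw [List.count_cons]
      by_cases hac : a = c
      · rw [if_pos (by simp [hac])] at hsplit
        have hcc : List.count c (a :: c :: d :: zs) = 1 :=
          (congrArg (fun v => List.count v (a :: c :: d :: zs)) hac).symm.trans hca
        simp only [List.length_cons] at *
        omega
      · rw [if_neg (by simp [hac])] at hsplit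
        have hcl : (a :: c :: d :: zs).count c = (a :: c :: d :: zs).length - 1 := by
          simp only [List.length_cons] at *
          omega
        exact hex c (by simp) hcl
    · rfl

theorem main_pair (a c : Int) : is_only_one_byte_diff [a, c] = is_only_one_byte_diff_alt [a, c] := by
  by_cases h : a = c
  · subst h
    rw [A_eq, pvScan_none _ _ _ _ (by
      intro k hk
      rw [PySem.Dict.getD_counter]
      have hkm : k ∈ [a, a] := (mem_keys_counter _ _).mp hk
      have hka : k = a := by simpa using hkm
      subst hka
      simp), B_eq]
    rw [pvG_nil_of_all_not _ _ (by intro y hy; simp at hy; simp [hy])]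
    simp
  · have h' : ¬ c = a := fun hh => h hh.symm
    have hkeys : PySem.Set.ofList [a, c] = [a, c] := by
      simp [PySem.Set.ofList, PySem.Set.add, PySem.Set.contains, h']
    have hG : pvG (fun v => decide (v ≠ a)) [a, c] = [1] := by
      have hca : decide (c ≠ a) = true := by simp [h']
      simp [pvG, hca]
    have hB : is_only_one_byte_diff_alt [a, c] = (true, some 1) := by
      rw [B_eq, hG]
      rfl
    have hfind : pvFindIdx [a, c] a
        (PySem.List.pyRange 0 ((([a, c] : List Int).length : Int) - 1 + 1) 1) = some 1 := by
      rw [show ((([a, c] : List Int).length : Int) - 1 + 1) = (([a, c] : List Int).length : Int) by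
        ring]
      rw [pvFindIdx_eq, hG]
      rfl
    rw [hB, A_eq, PySem.Dict.keys_counter, hkeys, pvScan]
    rw [if_pos (by rw [PySem.Dict.getD_counter]; simp [h])]
    rw [hfind]

theorem main_single (a : Int) : is_only_one_byte_diff [a] = is_only_one_byte_diff_alt [a] := by
  simp [is_only_one_byte_diff, is_only_one_byte_diff_alt, pvCountLoop, pvScan,
    PySem.Dict.empty, PySem.Dict.contains, PySem.Dict.modify, PySem.Dict.insert,
    PySem.Dict.keys, PySem.Dict.getD, PySem.Dict.get?]

-- ===== VERDICT (by name: the statement is the Claim_ definition above) =====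
theorem is_only_one_byte_diff_spec : Claim_equal_is_only_one_byte_diff := by
  intro block _
  show is_only_one_byte_diff block = is_only_one_byte_diff_alt block
  match block with
  | [] => rfl
  | [a] => exact main_single a
  | [a, c] => exact main_pair a c
  | a :: c :: d :: zs => exact main_three a c d zs
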